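-- pv_equiv track=rewrite | github.com/tuanphong160896/MCDC-Tool | Core.py | Split_lst
-- ===== SOURCE A (Python) =====
-- def Split_lst(processed_str_lst, split_factor):
--     return_lst = []
--     return_lst_temp = []
--     unitlength_lst = []
--
--     for column in range(len(processed_str_lst)):
--         unit_length = int(len(processed_str_lst[column])/split_factor)
--         temp_lst = [unit_length]*split_factor
--         if (sum(temp_lst) < len(processed_str_lst[column])):
--             redundant = len(processed_str_lst[column]) - sum(temp_lst)
--             for k in range(redundant): temp_lst[k] += 1
--         unitlength_lst.append(temp_lst)
--
--     for column_index in range(len(unitlength_lst)):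
--         for elem_index in range(1, len(unitlength_lst[column_index])):
--             unitlength_lst[column_index][elem_index] += unitlength_lst[column_index][elem_index-1]
--
--     for split_step in range(split_factor):
--         for column_index in range (len(processed_str_lst)):
--             if (split_step == 0): start_index = 0
--             else: start_index = unitlength_lst[column_index][split_step-1]
--             end_index = unitlength_lst[column_index][split_step]
--             return_lst_temp.append(processed_str_lst[column_index][start_index : end_index])
--         return_lst.append(return_lst_temp)
--         return_lst_temp = []
--
--     return return_lst
-- ===== SOURCE B (Python) =====
-- def Split_lst(processed_str_lst, split_factor):
--     # Closed-form chunk boundaries: no chunk-size table, no prefix-sum pass.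
--     return_lst = []
--     for step in range(split_factor):
--         row = []
--         for col in processed_str_lst:
--             unit = int(len(col) / split_factor)
--             redundant = len(col) - unit * split_factor
--             start = step * unit + min(step, redundant)
--             end = start + unit + (1 if step < redundant else 0)
--             row.append(col[start:end])
--         return_lst.append(row)
--     return return_lst
-- ===== Notes on version B (the rewrite author's own statement) =====
-- stated objective: simpler
-- what changed: Replaced A's three preparatory passes (per-column chunk-size lists, remainder bumping, in-place prefix-sum table) by direct closed-form chunk boundaries start = step*unit + min(step, redundant) computed inside the single output loop.
-- crash fix: On split_factor = 0 with a nonempty list A raises ZeroDivisionError, and on split_factor < 0 with any nonempty string A raises IndexError; B returns [] (split_factor non-positive yields no chunks). — e.g. on Split_lst(["a"], 0): A raises ZeroDivisionError, B returns []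
import Mathlib
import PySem

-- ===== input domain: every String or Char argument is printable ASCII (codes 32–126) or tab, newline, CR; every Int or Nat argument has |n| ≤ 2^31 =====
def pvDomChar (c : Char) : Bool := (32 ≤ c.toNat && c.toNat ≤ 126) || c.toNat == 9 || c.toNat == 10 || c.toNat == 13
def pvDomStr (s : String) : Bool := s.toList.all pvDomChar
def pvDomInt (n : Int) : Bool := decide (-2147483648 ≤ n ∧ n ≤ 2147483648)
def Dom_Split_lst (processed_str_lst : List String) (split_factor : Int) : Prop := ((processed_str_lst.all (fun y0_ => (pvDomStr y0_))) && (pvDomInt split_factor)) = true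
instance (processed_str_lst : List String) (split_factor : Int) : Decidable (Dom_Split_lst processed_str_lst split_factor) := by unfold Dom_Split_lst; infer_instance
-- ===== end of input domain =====

-- B drops A's three preparatory passes (chunk-size table, remainder bump, prefix-sum pass) and
-- computes each chunk boundary in closed form inside the single output loop (objective: simpler).


-- ===== PORT A =====
-- per-column chunk-size list: temp_lst = [unit_length]*split_factor, first `redundant` entries bumped
-- (int(len/split_factor) ported as PySem.Int.truncdiv — exact for these magnitudes)
def pvTempOf (split_factor : Int) (col : String) : List Int :=
  let unit_length := PySem.Int.truncdiv (PySem.Str.len col) split_factor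
  let temp := List.replicate split_factor.toNat unit_length
  if temp.sum < PySem.Str.len col then
    (List.range (PySem.Str.len col - temp.sum).toNat).foldl
      (fun t k => t.set k (t.getD k 0 + 1)) temp
  else temp

-- the in-place cumulative-sum inner loop: for elem_index in range(1, len(t)): t[i] += t[i-1]
def pvCumOf (t : List Int) : List Int :=
  (List.range' 1 (t.length - 1)).foldl (fun a i => a.set i (a.getD i 0 + a.getD (i - 1) 0)) t

def Split_lst (processed_str_lst : List String) (split_factor : Int) : List (List String) :=
  let unitlength_lst :=
    (List.range processed_str_lst.length).foldl
      (fun acc column => acc ++ [pvTempOf split_factor (processed_str_lst.getD column "")]) []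
  let unitlength_lst :=
    (List.range unitlength_lst.length).foldl
      (fun acc ci => acc.set ci (pvCumOf (acc.getD ci []))) unitlength_lst
  (List.range split_factor.toNat).foldl
    (fun ret s =>
      ret ++ [(List.range processed_str_lst.length).foldl
        (fun row ci =>
          let start_index : Int := if s = 0 then 0 else (unitlength_lst.getD ci []).getD (s - 1) 0
          let end_index : Int := (unitlength_lst.getD ci []).getD s 0
          row ++ [PySem.Str.slice (processed_str_lst.getD ci "") (some start_index) (some end_index)]) []]) []

-- ===== PORT B =====
def Split_lst_alt (processed_str_lst : List String) (split_factor : Int) : List (List String) :=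
  (List.range split_factor.toNat).foldl
    (fun ret (step : Nat) =>
      ret ++ [processed_str_lst.map (fun col =>
        let unit := PySem.Int.truncdiv (PySem.Str.len col) split_factor
        let redundant := PySem.Str.len col - unit * split_factor
        let start := (step : Int) * unit + min (step : Int) redundant
        let stop := start + unit + (if (step : Int) < redundant then 1 else 0)
        PySem.Str.slice col (some start) (some stop))]) []

-- ===== PRECONDITION & SPEC =====
-- Pre_ excludes exactly the inputs on which A raises: split_factor = 0 with a nonempty list
-- (ZeroDivisionError) and split_factor < 0 with some nonempty string (IndexError).
def Pre_Split_lst (processed_str_lst : List String) (split_factor : Int) : Prop :=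
  0 < split_factor ∨ processed_str_lst = [] ∨
    (split_factor < 0 ∧ ∀ s ∈ processed_str_lst, s = "")
instance (processed_str_lst : List String) (split_factor : Int) : Decidable (Pre_Split_lst processed_str_lst split_factor) := by unfold Pre_Split_lst; infer_instance
def pvWitness_Split_lst : List String × Int := (["ab", "c"], 2)

-- On split_factor = 0 with a nonempty list A raises ZeroDivisionError, and on split_factor < 0
-- with any nonempty string A raises IndexError; B returns [] (non-positive factor: no chunks).
def Raises_Split_lst (processed_str_lst : List String) (split_factor : Int) : Prop :=
  (split_factor = 0 ∧ processed_str_lst ≠ []) ∨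
    (split_factor < 0 ∧ ∃ s ∈ processed_str_lst, s ≠ "")
instance (processed_str_lst : List String) (split_factor : Int) : Decidable (Raises_Split_lst processed_str_lst split_factor) := by unfold Raises_Split_lst; infer_instance
def pvRaiseWitness_Split_lst : List String × Int := (["a"], 0)
def pvRaiseWitnessOut_Split_lst : List (List String) := []

def Spec_Split_lst (processed_str_lst : List String) (split_factor : Int) (out : List (List String)) : Prop := out = Split_lst_alt processed_str_lst split_factor
instance (processed_str_lst : List String) (split_factor : Int) (out : List (List String)) : Decidable (Spec_Split_lst processed_str_lst split_factor out) := by unfold Spec_Split_lst; infer_instance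

-- ===== CLAIM (what is proved, stated in full; the proofs are below) =====
def Claim_equal_Split_lst : Prop := ∀ (processed_str_lst : List String) (split_factor : Int), Dom_Split_lst processed_str_lst split_factor → Pre_Split_lst processed_str_lst split_factor → Spec_Split_lst processed_str_lst split_factor (Split_lst processed_str_lst split_factor)
def Claim_raises_Split_lst : Prop := (∀ (processed_str_lst : List String) (split_factor : Int), Dom_Split_lst processed_str_lst split_factor → Raises_Split_lst processed_str_lst split_factor → ¬ Pre_Split_lst processed_str_lst split_factor) ∧ (Dom_Split_lst (pvRaiseWitness_Split_lst.1) (pvRaiseWitness_Split_lst.2) ∧ Raises_Split_lst (pvRaiseWitness_Split_lst.1) (pvRaiseWitness_Split_lst.2) ∧ Split_lst_alt (pvRaiseWitness_Split_lst.1) (pvRaiseWitness_Split_lst.2) = pvRaiseWitnessOut_Split_lst)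

-- ===== LEMMAS AND PROOFS =====

-- the "+1"-bump loop: length preserved, entries below q bumped by one
theorem pv_bump_length (q : Nat) (t : List Int) :
    ((List.range q).foldl (fun a k => a.set k (a.getD k 0 + 1)) t).length = t.length := by
  induction q with
  | zero => simp
  | succ m ih =>
    rw [List.range_succ, List.foldl_append]
    simpa using ih

theorem pv_bump_getD (q : Nat) (t : List Int) (hq : q ≤ t.length) :
    ∀ j < t.length, ((List.range q).foldl (fun a k => a.set k (a.getD k 0 + 1)) t).getD j 0
      = t.getD j 0 + (if j < q then 1 else 0) := by
  induction q with
  | zero => intro j hj; simp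
  | succ m ih =>
    intro j hj
    have ihm := ih (by omega)
    have hlen := pv_bump_length m t
    rw [List.range_succ, List.foldl_append]
    simp only [List.foldl_cons, List.foldl_nil]
    rw [List.getD_eq_getElem?_getD, List.getElem?_set]
    rcases eq_or_ne m j with h | h
    · subst h
      rw [if_pos rfl, if_pos (by omega)]
      simp only [Option.getD_some]
      rw [ihm m (by omega)]
      split_ifs <;> omega
    · rw [if_neg h, ← List.getD_eq_getElem?_getD, ihm j hj]
      split_ifs <;> omega

-- the chunk-size list is pointwise u + (1 below the remainder)
theorem pv_temp_eq (split_factor : Int) (col : String) (hsf : 0 < split_factor) :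
    pvTempOf split_factor col
      = (List.range split_factor.toNat).map
          (fun k : Nat => PySem.Int.truncdiv (PySem.Str.len col) split_factor
            + (if (k : Int) < PySem.Str.len col
                    - PySem.Int.truncdiv (PySem.Str.len col) split_factor * split_factor
               then 1 else 0)) := by
  have hn : 0 ≤ PySem.Str.len col := by rw [PySem.Str.len_eq]; positivity
  set n := PySem.Str.len col with hn'
  set u := PySem.Int.truncdiv n split_factor with hu
  have hsfc : ((split_factor.toNat : Nat) : Int) = split_factor := Int.toNat_of_nonneg (le_of_lt hsf)
  have hsum : (List.replicate split_factor.toNat u).sum = split_factor * u := by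
    rw [List.sum_replicate, nsmul_eq_mul, hsfc]
  have hue : u = n / split_factor := by
    rw [hu]; unfold PySem.Int.truncdiv; exact Int.tdiv_eq_ediv_of_nonneg hn
  have hr : n - u * split_factor = n % split_factor := by
    rw [hue, Int.emod_def]; ring
  have hr0 : 0 ≤ n - u * split_factor := by rw [hr]; exact Int.emod_nonneg n (by omega)
  have hrlt : n - u * split_factor < split_factor := by rw [hr]; exact Int.emod_lt_of_pos n hsf
  have hcomm : u * split_factor = split_factor * u := mul_comm u split_factor
  simp only [pvTempOf]
  rw [← hn', ← hu, hsum]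
  by_cases hc : split_factor * u < n
  · rw [if_pos hc]
    have hql : (n - split_factor * u).toNat ≤ (List.replicate split_factor.toNat u).length := by
      simp only [List.length_replicate]; omega
    apply List.ext_getElem
    · rw [pv_bump_length]; simp
    · intro j hj1 hj2
      have hjm : j < split_factor.toNat := by
        rw [pv_bump_length, List.length_replicate] at hj1; exact hj1
      rw [← List.getD_eq_getElem _ 0 hj1, ← List.getD_eq_getElem _ 0 hj2,
        pv_bump_getD _ _ hql j (by simpa using hjm),
        List.getD_eq_getElem _ _ hj2, List.getElem_map, List.getElem_range,
        List.getD_replicate _ hjm]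
      split_ifs with h1 h2 h2 <;> omega
  · rw [if_neg hc]
    have hr00 : n - u * split_factor = 0 := by omega
    apply List.ext_getElem
    · simp
    · intro j hj1 hj2
      rw [List.getElem_replicate, List.getElem_map, List.getElem_range]
      rw [if_neg (by omega)]
      omega

-- the cumulative-sum loop computes prefix sums
theorem pv_cum_aux (t : List Int) : ∀ m, m < t.length →
    ((List.range' 1 m).foldl (fun a i => a.set i (a.getD i 0 + a.getD (i - 1) 0)) t).length
        = t.length ∧
    ∀ j < t.length,
      ((List.range' 1 m).foldl (fun a i => a.set i (a.getD i 0 + a.getD (i - 1) 0)) t).getD j 0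
        = if j ≤ m then (t.take (j + 1)).sum else t.getD j 0 := by
  intro m
  induction m with
  | zero =>
    intro hm
    refine ⟨by simp, ?_⟩
    intro j hj
    simp only [List.range'_zero, List.foldl_nil]
    split_ifs with h
    · interval_cases j
      cases t with
      | nil => simp at hj
      | cons x xs => simp
    · rfl
  | succ m ih =>
    intro hm
    obtain ⟨ihl, ihg⟩ := ih (by omega)
    rw [List.range'_concat]
    simp only [List.foldl_append, List.foldl_cons, List.foldl_nil, mul_comm]
    constructor
    · rw [List.length_set, ihl]
    · intro j hj
      have h1m : 1 + m * 1 = m + 1 := by omega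
      rw [h1m]
      have hsub : m + 1 - 1 = m := by omega
      rw [hsub]
      rw [List.getD_eq_getElem?_getD, List.getElem?_set]
      rcases eq_or_ne (m + 1) j with h | h
      · subst h
        have e1 := ihg (m + 1) hj
        rw [if_neg (by omega)] at e1
        have e2 := ihg m (by omega)
        rw [if_pos (le_refl m)] at e2
        rw [if_pos rfl, if_pos (by omega), Option.getD_some, e1, e2, if_pos (by omega)]
        rw [List.take_add_one (i := m + 1), List.sum_append, List.getElem?_eq_getElem hj]
        simp only [Option.toList_some, List.sum_cons, List.sum_nil, add_zero]
        rw [List.getD_eq_getElem _ _ hj]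
        ring
      · rw [if_neg h, ← List.getD_eq_getElem?_getD, ihg j hj]
        split_ifs <;> first | rfl | omega

theorem pv_cum_getD (t : List Int) (s : Nat) (hs : s < t.length) :
    (pvCumOf t).getD s 0 = (t.take (s + 1)).sum := by
  unfold pvCumOf
  obtain ⟨-, hg⟩ := pv_cum_aux t (t.length - 1) (by omega)
  rw [hg s hs, if_pos (by omega)]

-- prefix sums of the bumped constant list, in closed form
theorem pv_prefix_sum (u r : Int) (hr : 0 ≤ r) (q : Nat) :
    ((List.range q).map (fun k : Nat => u + (if (k : Int) < r then 1 else 0))).sum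
      = q * u + min (q : Int) r := by
  induction q with
  | zero => simp; omega
  | succ m ih =>
    rw [List.range_succ, List.map_append, List.sum_append, ih]
    simp only [List.map_cons, List.map_nil, List.sum_cons, List.sum_nil]
    push_cast
    rw [add_mul, one_mul]
    split_ifs with h <;> omega

-- the in-place "set each index to f of itself" loop is a map
theorem pv_setmap_aux {α : Type} (h : α → α) (d : α) (xs : List α) :
    ∀ m ≤ xs.length,
      (List.range' 0 m).foldl (fun a ci => a.set ci (h (a.getD ci d))) xs
        = (xs.take m).map h ++ xs.drop m := by
  intro m
  induction m with
  | zero => intro _; simp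
  | succ m ih =>
    intro hm
    have hmlen : m < xs.length := by omega
    rw [List.range'_concat, List.foldl_append, ih (by omega)]
    simp only [List.foldl_cons, List.foldl_nil, Nat.zero_add, Nat.one_mul]
    have hlm : ((xs.take m).map h).length = m := by
      rw [List.length_map, List.length_take]; omega
    have hget : ((xs.take m).map h ++ xs.drop m).getD m d = xs[m] := by
      rw [List.getD_eq_getElem?_getD, List.getElem?_append_right (by omega), hlm,
        Nat.sub_self, List.getElem?_drop, Nat.add_zero, List.getElem?_eq_getElem hmlen,
        Option.getD_some]
    rw [hget, List.set_append, if_neg (by omega), hlm, Nat.sub_self,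
      List.drop_eq_getElem_cons hmlen, List.set_cons_zero,
      List.take_add_one, List.getElem?_eq_getElem hmlen]
    simp only [Option.toList_some, List.map_append, List.map_cons, List.map_nil, List.map_take]
    simp

theorem pv_setmap {α : Type} (h : α → α) (d : α) (xs : List α) :
    (List.range xs.length).foldl (fun a ci => a.set ci (h (a.getD ci d))) xs = xs.map h := by
  rw [List.range_eq_range', pv_setmap_aux h d xs xs.length (le_refl _),
    List.take_of_length_le (le_refl _), List.drop_of_length_le (le_refl _), List.append_nil]

-- the whole per-column table, in closed form, at each step
theorem pv_table_getD (split_factor : Int) (col : String) (hsf : 0 < split_factor)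
    (s : Nat) (hs : s < split_factor.toNat) :
    (pvCumOf (pvTempOf split_factor col)).getD s 0
      = ((s : Int) + 1) * PySem.Int.truncdiv (PySem.Str.len col) split_factor
        + min ((s : Int) + 1)
            (PySem.Str.len col
              - PySem.Int.truncdiv (PySem.Str.len col) split_factor * split_factor) := by
  have hr0 : 0 ≤ PySem.Str.len col
      - PySem.Int.truncdiv (PySem.Str.len col) split_factor * split_factor := by
    have hn : 0 ≤ PySem.Str.len col := by rw [PySem.Str.len_eq]; positivity
    have : PySem.Int.truncdiv (PySem.Str.len col) split_factor
        = PySem.Str.len col / split_factor := Int.tdiv_eq_ediv_of_nonneg hn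
    rw [this]
    have := Int.emod_nonneg (PySem.Str.len col) (by omega : split_factor ≠ 0)
    rw [Int.emod_def, mul_comm] at this
    omega
  rw [pv_temp_eq split_factor col hsf]
  have hlen : ((List.range split_factor.toNat).map
      (fun k : Nat => PySem.Int.truncdiv (PySem.Str.len col) split_factor
        + (if (k : Int) < PySem.Str.len col
              - PySem.Int.truncdiv (PySem.Str.len col) split_factor * split_factor
           then 1 else 0))).length = split_factor.toNat := by simp
  rw [pv_cum_getD _ s (by omega), ← List.map_take, List.take_range,
    Nat.min_eq_left (by omega), pv_prefix_sum _ _ hr0 (s + 1)]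
  push_cast
  ring_nf

-- ===== VERDICT (by name: the statement is the Claim_ definition above) =====
theorem Split_lst_spec : Claim_equal_Split_lst := by
  intro lst sf _ _
  unfold Spec_Split_lst
  rcases (by omega : sf ≤ 0 ∨ 0 < sf) with hle | hsf
  · simp [Split_lst, Split_lst_alt, Int.toNat_of_nonpos hle]
  · simp only [Split_lst, Split_lst_alt]
    rw [PySem.List.foldl_append_singleton_eq_map
        (f := fun column => pvTempOf sf (lst.getD column "")),
      List.nil_append, pv_setmap, List.map_map,
      PySem.List.foldl_append_singleton_eq_map, List.nil_append,
      PySem.List.foldl_append_singleton_eq_map, List.nil_append]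
    apply List.map_congr_left
    intro s hs
    rw [List.mem_range] at hs
    rw [PySem.List.foldl_append_singleton_eq_map, List.nil_append]
    apply List.ext_getElem (by simp)
    intro ci h1 h2
    have hci : ci < lst.length := by simpa using h1
    simp only [List.getElem_map, List.getElem_range]
    rw [List.getD_eq_getElem _ _ hci]
    have htbl : (List.map (pvCumOf ∘ fun column => pvTempOf sf (lst.getD column ""))
        (List.range lst.length)).getD ci []
        = pvCumOf (pvTempOf sf lst[ci]) := by
      rw [List.getD_eq_getElem _ _ (by simpa using hci), List.getElem_map, List.getElem_range]
      simp [List.getElem?_eq_getElem hci]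
    rw [htbl]
    set col := lst[ci] with hcol
    set n := PySem.Str.len col with hn'
    set u := PySem.Int.truncdiv n sf with hu'
    set r := n - u * sf with hr'
    have hn : 0 ≤ n := by rw [hn', PySem.Str.len_eq]; positivity
    have hr0 : 0 ≤ r := by
      have hue : u = n / sf := Int.tdiv_eq_ediv_of_nonneg hn
      have := Int.emod_nonneg n (by omega : sf ≠ 0)
      rw [Int.emod_def, mul_comm] at this
      rw [hr', hue]; omega
    have hstart :
        (if s = 0 then (0 : Int) else (pvCumOf (pvTempOf sf col)).getD (s - 1) 0)
          = (s : Int) * u + min (s : Int) r := by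
      by_cases h0 : s = 0
      · subst h0
        rw [if_pos rfl]
        simp [min_eq_left hr0]
      · rw [if_neg h0, pv_table_getD sf col hsf (s - 1) (by omega), ← hn', ← hu', ← hr']
        have hc : ((s - 1 : Nat) : Int) + 1 = (s : Int) := by omega
        rw [hc]
    have hstop : (pvCumOf (pvTempOf sf col)).getD s 0
        = (s : Int) * u + min (s : Int) r + u + (if (s : Int) < r then 1 else 0) := by
      rw [pv_table_getD sf col hsf s hs, ← hn', ← hu', ← hr']
      have : ((s : Int) + 1) * u = (s : Int) * u + u := by ring
      rw [this]
      split_ifs with h <;> omega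
    rw [hstart, hstop]

theorem Split_lst_raises : Claim_raises_Split_lst := by
  unfold Claim_raises_Split_lst
  refine ⟨?_, by decide⟩
  rintro lst sf _ (⟨h0, hne⟩ | ⟨hneg, s, hs, hne⟩) (hp | hp | ⟨hp, hall⟩)
  · omega
  · exact hne hp
  · omega
  · omega
  · simp [hp] at hs
  · exact hne (hall s hs)

-- self-check: the raise witness really lies inside Raises_ (reuses the theorem above)
theorem pv_raise_witness_ok :
    Raises_Split_lst (pvRaiseWitness_Split_lst.1) (pvRaiseWitness_Split_lst.2) :=
  Split_lst_raises.2.2.1
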